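/- GENERATED by mk_final_copies.py from the proof of the farm's unit `do_floor` (farm:do_floor.2: Lemmas.lean) as the
   re-elaboration sweep compiled it — do not edit. -/
import Asan.CheckWalk
import Vorbis.Spec.Units.do_floor

open X86 X86.User Asan Vorbis Vorbis.Spec

set_option maxRecDepth 4000
set_option maxHeartbeats 0

namespace Vorbis.Spec.do_floor

/-- Two words with the same value are equal (the way every bit-level fact below is proved). -/
theorem word_eq_of_toNat {a b : Word} (h : a.toNat = b.toNat) : a = b :=
  UInt64.toNat_inj.mp h

/-- A small number as a word, back as a number. -/
theorem toNat_ofNat_small (n : Nat) (h : n < 2 ^ 64) : (UInt64.ofNat n).toNat = n := by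
  rw [UInt64.toNat_ofNat']
  exact Nat.mod_eq_of_lt h

/-- The low half of a small number. -/
theorem part32_ofNat (j : Nat) (h : j < 2 ^ 32) : (Word.part .w32 (UInt64.ofNat j)).toNat = j := by
  rw [Vorbis.toNat_part32, toNat_ofNat_small j (by omega)]
  exact Nat.mod_eq_of_lt h

/-- `movsxd rax, r13d` of a loop counter below `2 ^ 31` is the counter. -/
theorem sext_part_ofNat (j : Nat) (h : j < 2 ^ 31) :
    Word.ofBV (BitVec.signExtend 64 (Word.part .w32 (UInt64.ofNat j))) = UInt64.ofNat j := by
  apply word_eq_of_toNat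
  rw [toNat_sext32 _ (by rw [part32_ofNat j (by omega)]; exact h), part32_ofNat j (by omega), toNat_ofNat_small j (by omega)]

/-- The signed value of the low half of a counter below `2 ^ 31` (the form of a signed compare). -/
theorem toInt_part_ofNat (j : Nat) (h : j < 2 ^ 31) : (Word.part .w32 (UInt64.ofNat j)).toInt = (j : Int) := by
  rw [toInt_of_lt _ (by rw [part32_ofNat j (by omega)]; exact h), part32_ofNat j (by omega)]

/-- `add r13d, 1` of a counter below `2 ^ 31`. -/
theorem inc_part_ofNat (j : Nat) (h : j < 2 ^ 31) :
    Word.ofBV (Word.part .w32 (UInt64.ofNat j) + 1#32) = UInt64.ofNat (j + 1) := by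
  apply word_eq_of_toNat
  rw [Vorbis.toNat_ofBV32, BitVec.toNat_add, part32_ofNat j (by omega), toNat_ofNat_small (j + 1) (by omega)]
  have e1 : (1#32).toNat = 1 := by decide
  rw [e1]
  omega

/-- `movzx r32, byte` of a byte value. -/
theorem zext8 (b : Nat) (h : b < 256) : Word.ofBV (BitVec.zeroExtend 32 (BitVec.ofNat 8 b)) = UInt64.ofNat b := by
  apply word_eq_of_toNat
  rw [Vorbis.toNat_ofBV32, toNat_ofNat_small b (by omega)]
  simp only [BitVec.toNat_setWidth, BitVec.toNat_ofNat]
  omega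

/-- `movzx eax, bl` of a register that holds a byte value. -/
theorem zext_part8 (b : Nat) (h : b < 256) :
    Word.ofBV (BitVec.zeroExtend 32 (Word.part .w8 (UInt64.ofNat b))) = UInt64.ofNat b := by
  apply word_eq_of_toNat
  rw [Vorbis.toNat_ofBV32, toNat_ofNat_small b (by omega)]
  unfold Word.part
  simp only [Width.bits, BitVec.toNat_setWidth, UInt64.toNat_toBitVec]
  rw [toNat_ofNat_small b (by omega)]
  omega

/-- `movsxd` of a non-negative `int` argument whose signed value is the number `i`. -/
theorem sext_of_nonneg (y : BitVec 32) (i : Nat) (h : y.toInt = (i : Int)) :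
    Word.ofBV (BitVec.signExtend 64 y) = UInt64.ofNat i := by
  have hy : y.toNat = i ∧ i < 2 ^ 31 := by
    have := y.isLt
    rw [BitVec.toInt_eq_toNat_cond] at h
    split at h <;> omega
  apply word_eq_of_toNat
  rw [toNat_sext32 _ (by omega), toNat_ofNat_small i (by omega)]
  exact hy.1

/-- `sar ecx, 1`: the signed value of the arithmetic shift is the division by 2 rounded down. -/
theorem toInt_sar1 (x : BitVec 32) : (x.sshiftRight 1).toInt = x.toInt / 2 := by
  rw [BitVec.toInt_sshiftRight, Int.shiftRight_eq_div_pow]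
  rfl

/-- `movzx r32, word` of a 16-bit value. -/
theorem zext16 (b : Nat) (h : b < 65536) : Word.ofBV (BitVec.zeroExtend 32 (BitVec.ofNat 16 b)) = UInt64.ofNat b := by
  apply word_eq_of_toNat
  rw [Vorbis.toNat_ofBV32, toNat_ofNat_small b (by omega)]
  simp only [BitVec.toNat_setWidth, BitVec.toNat_ofNat]
  omega

/-- `mov r13d, r14d` of a register that holds a number below `2 ^ 32`. -/
theorem ofBV_part_ofNat (n : Nat) (h : n < 2 ^ 32) : Word.ofBV (Word.part .w32 (UInt64.ofNat n)) = UInt64.ofNat n := by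
  apply word_eq_of_toNat
  rw [Vorbis.toNat_ofBV32, part32_ofNat n h, toNat_ofNat_small n (by omega)]

/-- The low half of a zero-extended 32-bit value is the value. -/
theorem part_ofBV32 (x : BitVec 32) : Word.part .w32 (Word.ofBV x) = x := by
  apply BitVec.eq_of_toNat_eq
  rw [Vorbis.toNat_part32, Vorbis.toNat_ofBV32]
  exact Nat.mod_eq_of_lt x.isLt

/-- A number below `2 ^ 31` as a 32-bit signed value (the form of `cmp [g->values], r12d`). -/
theorem toInt_ofNat32_small (n : Nat) (h : n < 2 ^ 31) : (BitVec.ofNat 32 n).toInt = (n : Int) := by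
  rw [toInt_of_lt _ (by rw [toNat_ofNat32 n (by omega)]; exact h), toNat_ofNat32 n (by omega)]

/-- **`finalY[j] * g->floor1_multiplier`** (`imul ebp, eax` of a sign-extended `int16` and a zero-extended byte): the 32-bit
product is at most `32768 · 255` in absolute value, so the difference of two of them is not `INT_MIN` (draw_line's `idiv`). -/
theorem mul_i16_u8 (a : BitVec 16) (b : BitVec 8) :
    -8355840 ≤ (BitVec.signExtend 32 a * BitVec.zeroExtend 32 b).toInt ∧
      (BitVec.signExtend 32 a * BitVec.zeroExtend 32 b).toInt ≤ 8355585 := by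
  have h1 : (4286611456#32).sle (BitVec.signExtend 32 a * BitVec.zeroExtend 32 b) = true := by
    bv_decide
  have h2 : (BitVec.signExtend 32 a * BitVec.zeroExtend 32 b).sle 8355585#32 = true := by
    bv_decide
  rw [BitVec.sle_eq_decide] at h1 h2
  simp only [decide_eq_true_eq] at h1 h2
  have e1 : (4286611456#32).toInt = -8355840 := by decide
  have e2 : (8355585#32).toInt = 8355585 := by decide
  rw [e1] at h1
  rw [e2] at h2
  exact ⟨h1, h2⟩

/-- **Where an allocated block is**: a range inside an allocated (hence live) block lies in the data space above the image's
text and off this function's stack `[rsp - 192, rsp + 8)`: the two facts `u_omega` needs to read a load through the stack stores. -/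
theorem range_where {others : List Obj} {frames : List (Nat × FrameLayout)} {Blk : Block → Prop} {u : State}
    (hsh : ShadowPre others frames u) (hL : BlkLive Blk (Live (stackObjs frames ++ others)))
    (hroom : 7340032 + 192 ≤ (u.reg .rsp).toNat) (htop : (u.reg .rsp).toNat + 8 ≤ 8388608)
    {B : Block} (hB : Blk B) (a n : Nat) (hn : 0 < n) (h1 : B.base ≤ a) (h2 : a + n ≤ B.base + B.size) :
    (0x119d40 ≤ a ∧ a + n ≤ 0xC00000) ∧
      ((u.reg .rsp).toNat + 8 ≤ a ∨ a + n ≤ (u.reg .rsp).toNat - 192) := by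
  have hb : LiveBytes others frames B.base B.size := hL B hB
  have hw := (hb.sub a n h1 h2).where_ hsh.inv hsh.offText hn (by omega)
  omega

/-- A load at a word whose value is the number `a` is the typed read's load at `addr a`. -/
theorem readLE_at (mem : Mem) (w : Word) (a n : Nat) (h : w.toNat = a) : mem.readLE w n = mem.readLE (addr a) n := by
  rw [← h, addr_toNat]

/-- The signed `int` in a register that holds a zero-extended 32-bit value. -/
theorem s32_ofBV (x : BitVec 32) : s32 (Word.ofBV x) = x.toInt := by
  show (Word.part .w32 (Word.ofBV x)).toInt = x.toInt
  rw [part_ofBV32]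

/-- `mov esi, r13d` of a counter below `2 ^ 31`, as a signed `int` argument. -/
theorem s32_ofBV_part_ofNat (n : Nat) (h : n < 2 ^ 31) : s32 (Word.ofBV (Word.part .w32 (UInt64.ofNat n))) = (n : Int) := by
  rw [s32_ofBV, toInt_part_ofNat n h]

/-- `mov edx, [rsp]` of a spilled 32-bit value, as a signed `int` argument. -/
theorem s32_ofBV_ofNat_toNat (x : BitVec 32) : s32 (Word.ofBV (BitVec.ofNat 32 x.toNat)) = x.toInt := by
  rw [s32_ofBV, BitVec.ofNat_toNat, BitVec.setWidth_eq]

/-- **A callee's window is empty or inside ours**: its footprint with our window instead (bytewise: an empty or inverted window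
may lie anywhere, so `Mem.SameExcept.eqOn` cannot be used on it). -/
theorem sameExcept_widen {w0 : Span} {a b lo hi : Nat} {μ ν : Mem} (h : Mem.SameExcept [w0, ⟨a, b⟩] μ ν)
    (hsub : b ≤ a ∨ (lo ≤ a ∧ b ≤ hi)) : Mem.SameExcept [w0, ⟨lo, hi⟩] μ ν := by
  apply h.mono
  intro w hw x h1 h2
  rcases List.mem_cons.mp hw with rfl | hw
  · exact ⟨w, List.mem_cons_self, h1, h2⟩
  · have e : w = ⟨a, b⟩ := List.mem_singleton.mp hw
    subst e
    refine ⟨⟨lo, hi⟩, List.mem_cons_of_mem _ List.mem_cons_self, ?_, ?_⟩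
    · show lo ≤ x
      have h1' : a ≤ x := h1
      have h2' : x < b := h2
      omega
    · show x < hi
      have h1' : a ≤ x := h1
      have h2' : x < b := h2
      omega

/-- **THE TAIL LOOP** 0x108bab (line 3129 `for (j = lx; j < n2; ++j)`), entered only with `n2 > 0`, to the `ret`. The binders
are the variables of the unit's statement, the function's entry state with its precondition, and the numbers that the main proof
names (`f`, the mapping record `m`, the floor element `G + 1596 * fl`, `n2 = N`, the window `[tlo, tlo + 4 * nn)` of the target
that is written); then the invariant of the loop head at the state `s`. -/
theorem tail_ok
    (Lay : Layout) (hLay : Lay.hi = 0x1000000) (μ : Microarch) (hμ : UserX.MicroOK μ) (u₀ : State)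
    (hcode : HasCodeNat Lay u₀ Vorbis.L.do_floor.entry Vorbis.Code.code_do_floor.nat Vorbis.L.do_floor.size)
    (hload8 : Asan.SmallCheck Lay μ Vorbis.WayInv (Vorbis.CodeOK u₀) [.rax, .rcx, .rdx] 8 Vorbis.L.__asan_load8_noabort.entry)
    (hload1 : Asan.SmallCheck Lay μ Vorbis.WayInv (Vorbis.CodeOK u₀) [.rax, .rdx] 1 Vorbis.L.__asan_load1_noabort.entry)
    (hload2 : Asan.SmallCheck Lay μ Vorbis.WayInv (Vorbis.CodeOK u₀) [.rax, .rcx, .rdx] 2 Vorbis.L.__asan_load2_noabort.entry)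
    (hdraw : ∀ (others : List Obj) (frames : List (Nat × FrameLayout)),
      Calls Lay μ Vorbis.WayInv (Vorbis.conv u₀) Vorbis.L.draw_line.entry (Vorbis.Spec.draw_line.spec others frames))
    (hload4 : Asan.SmallCheck Lay μ Vorbis.WayInv (Vorbis.CodeOK u₀) [.rax, .rcx, .rdx] 4 Vorbis.L.__asan_load4_noabort.entry)
    (others : List Obj) (frames : List (Nat × FrameLayout)) (Blk : Block → Prop) (mi : Nat) (u : State) (ret : Word)
    (he : AtEntry (Vorbis.conv u₀) Vorbis.L.do_floor.entry (Vorbis.Spec.do_floor.spec others frames Blk mi).frame ret u)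
    (hpre : (Vorbis.Spec.do_floor.spec others frames Blk mi).pre u)
    (f m i C mux fl G V : Nat) (hf : (u.reg .rdi).toNat = f) (hm : (u.reg .rsi).toNat = m)
    (hi : s32 (u.reg .rdx) = (i : Int)) (hC : Mapping.chan u.mem m = C)
    (hmux : MappingChannel.mux u.mem (Mapping.chan_at u.mem m i) = mux)
    (hfl' : Mapping.submap_floor u.mem m mux = fl) (hG : stb_vorbis.floor_config u.mem f = G)
    (hV : Floor1.values u.mem (G + 1596 * fl) = (V : Int))
    (n2v : BitVec 32) (N : Int) (nn tlo : Nat) (hn2v : (Word.part .w32 (u.reg .rcx)).sshiftRight 1 = n2v)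
    (hN : s32 (u.reg .rcx) / 2 = N) (hnn : N.toNat = nn)
    (htlo : tlo = if nn = 0 then 0 else (u.reg .r8).toNat) :
    ∀ (s : State) (j : Nat), s.rip = Vorbis.L.do_floor.loop2 → s.reg .rsp = u.reg .rsp - 72 →
      s.reg .r13 = UInt64.ofNat j → (j : Int) ≤ N → 0 < N →
      RegsKept [.r13, .rdi, .rcx, .r15, .r12, .rbx, .rbp, .rsp, .rax, .rdx, .r14, .rsi, .r8, .r9, .r10, .r11, .r16, .r17, .r18, .r19, .r20, .r21, .r22, .r23, .r24, .r25, .r26, .r27, .r28, .r29, .r30, .r31] u s →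
      Mem.SameExcept [⟨(u.reg .rsp).toNat - 192, (u.reg .rsp).toNat⟩, ⟨tlo, tlo + 4 * nn⟩] u.mem s.mem →
      ShadowUntouched u.mem s.mem →
      UInt64.ofNat (s.mem.readLE (u.reg .rsp) 8) = ret →
      UInt64.ofNat (s.mem.readLE (u.reg .rsp - 8) 8) = u.reg .r15 →
      UInt64.ofNat (s.mem.readLE (u.reg .rsp - 16) 8) = u.reg .r14 →
      UInt64.ofNat (s.mem.readLE (u.reg .rsp - 24) 8) = u.reg .r13 →
      UInt64.ofNat (s.mem.readLE (u.reg .rsp - 32) 8) = u.reg .r12 →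
      UInt64.ofNat (s.mem.readLE (u.reg .rsp - 40) 8) = u.reg .rbp →
      UInt64.ofNat (s.mem.readLE (u.reg .rsp - 48) 8) = u.reg .rbx →
      UInt64.ofNat (s.mem.readLE (u.reg .rsp - 64) 8) = u.reg .r8 →
      s.mem.readLE (u.reg .rsp - 68) 4 = n2v.toNat →
      Mem.EqOn Vorbis.L.textLo Vorbis.L.textHi u₀.mem s.mem →
      s.flags .df = false → s.mxcsr &&& 8064 = 8064 → SseOK s →
      ReachVia Lay μ WayInv s (Returned (conv u₀) (do_floor.spec others frames Blk mi) u ret) := by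
  v_entry he
  obtain ⟨hsh, hok, hlive, hob, hfl, hmp, hmi, hrsi, ⟨hi0, hi1⟩, ⟨sz, hfy, hfysz⟩, htgt, hdb⟩ := hpre
  have hdraw' := hdraw others frames
  have hsp := hsh.rsp
  -- THE OBJECTS: `*f`, the mapping record, the `chan` element, the floor element, the `finalY` block
  rw [hf] at hob hfl hmp hmi hrsi hi1 hfysz htgt
  rw [hm] at hrsi
  have hrec : MappingAtOK Blk u.mem f m := by
    rw [hrsi]
    exact hmp.record mi hmi
  have hiC : (i : Int) < stb_vorbis.channels u.mem f := by omega
  obtain ⟨hmuxS, hmux16⟩ := hrec.mux_lt hiC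
  have hflc := hrec.floor_of_mux_lt hiC
  rw [hmux] at hmuxS hmux16 hflc
  rw [hfl'] at hflc
  have hFL1 := hfl.FL1
  have hfl64 : fl < 64 := by omega
  have hg : IsFloor u.mem f (G + 1596 * fl) := IsFloor.of_eq hflc (by rw [hG]; rfl)
  have hF1 := hfl.floor hg
  obtain ⟨hV2', hV250'⟩ := hF1.values_bounds
  have hV2 : 2 ≤ V := by omega
  have hV250 : V ≤ 250 := by omega
  have hszV : 2 * V ≤ sz := by
    have := hfysz _ hg
    omega
  -- where they are: in the data space, off this function's stack
  have hmc := hmp.MP1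
  obtain ⟨hwm, hwm'⟩ := range_where hsh hlive he_room he_top hmp.MP1_block m 56 (by omega)
    (by rw [hrsi]; simp only [stb_vorbis.mapping_at, voff]; omega)
    (by rw [hrsi]; simp only [stb_vorbis.mapping_at, voff]; omega)
  obtain ⟨hwc, hwc'⟩ := range_where hsh hlive he_room he_top hrec.MP2 (C + 3 * i) 3 (by omega)
    (by rw [hC]; simp only []; omega) (by rw [hC, nchan_def]; simp only [voff]; omega)
  obtain ⟨hwf, hwf'⟩ := range_where hsh hlive he_room he_top hob f 1808 (by omega)
    (by simp only [vblock]; omega) (by simp only [vblock, voff]; omega)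
  have hgin := hfl.toFloorShape.elem_in hg (off := 0) (n := 1596) (by simp only [voff]; omega)
  obtain ⟨hwg, hwg'⟩ := range_where hsh hlive he_room he_top hfl.FL2 (G + 1596 * fl) 1596 (by omega)
    (by simp only [Block.contains] at hgin; omega) (by simp only [Block.contains] at hgin; omega)
  obtain ⟨hwy, hwy'⟩ := range_where hsh hlive he_room he_top hfy (u.reg .r9).toNat (2 * V) (by omega)
    (by simp only []; omega) (by simp only []; omega)
  -- THE LOADS OF THE PROLOGUE, in the walker's form (facts `u.mem.readLE a n = x` are rewrite rules of every step)
  have hsx : Word.ofBV (BitVec.signExtend 64 (Word.part .w32 (u.reg .rdx))) = UInt64.ofNat i := sext_of_nonneg _ i hi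
  have hi22 : i < 0x400000 := by omega
  have hz1 := zext8 mux (by omega)
  have hz2 := zext8 fl (by omega)
  have hz3 := zext_part8 fl (by omega)
  have r1 : u.mem.readLE (u.reg .rsi + 8) 8 = C := by
    rw [← hC, readLE_at u.mem _ (m + 8) 8 (by u_omega)]
    simp only [vacc, voff]
    rfl
  have r2 : u.mem.readLE (UInt64.ofNat i + UInt64.ofNat i * 2 + UInt64.ofNat C + 2) 1 = mux := by
    rw [← hmux, readLE_at u.mem _ (C + 3 * i + 2) 1 (by u_omega)]
    simp only [Mapping.chan_at, MappingChannel.mux, voff, hC]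
    rfl
  have r3 : u.mem.readLE (u.reg .rsi + UInt64.ofNat mux + 17) 1 = fl := by
    rw [← hfl', readLE_at u.mem _ (m + 17 + mux) 1 (by u_omega)]
    simp only [vacc, voff]
    rfl
  have r4 : u.mem.readLE (u.reg .rdi + (UInt64.ofNat fl + 88) * 2 + 4) 2 = 1 := by
    rw [← hfl.FL3 fl hflc, readLE_at u.mem _ (f + 180 + 2 * fl) 2 (by u_omega)]
    simp only [vacc, voff]
    rfl
  have r5 : u.mem.readLE (u.reg .rdi + 312) 8 = G := by
    rw [← hG, readLE_at u.mem _ (f + 312) 8 (by u_omega)]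
    simp only [vacc, voff]
    rfl
  have rvu : u.mem.readLE (UInt64.ofNat fl * 1596 + UInt64.ofNat G + 1592) 4 = V := by
    rw [readLE_at u.mem _ (G + 1596 * fl + 1592) 4 (by u_omega)]
    have h32 := u.mem.i32_cases (G + 1596 * fl + 1592)
    have hV' : u.mem.i32 (G + 1596 * fl + 1592) = (V : Int) := by
      rw [← hV]
      simp only [vacc, voff]
    show u.mem.u32 (G + 1596 * fl + 1592) = V
    omega
  have hso : ∀ q : Nat, q < V →
      u.mem.readLE (UInt64.ofNat fl * 1596 + UInt64.ofNat G + UInt64.ofNat q + 838) 1 < V := by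
    intro q hq
    have h9 := hF1.sorted_lt (q := q) (by omega)
    rw [hV] at h9
    rw [readLE_at u.mem _ (G + 1596 * fl + 838 + q) 1 (by u_omega)]
    simp only [vacc, voff] at h9
    have e : u.mem.readLE (addr (G + 1596 * fl + 838 + q)) 1 = u.mem.u8 (G + 1596 * fl + 838 + q) := rfl
    rw [e]
    omega
  -- `n2 = n >> 1`, and THE WINDOW OF THE TARGET THAT IS WRITTEN (empty, placed at 0, when `n2 ≤ 0`)
  have hn2N : n2v.toInt = N := by
    rw [← hn2v, toInt_sar1]
    exact hN
  have hNlt : N < 2 ^ 31 := by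
    rw [← hn2N]
    exact BitVec.toInt_lt
  rw [hN] at htgt
  rw [hnn] at htgt
  have htw : tlo + 4 * nn ≤ 0xC00000 ∧
      (tlo + 4 * nn ≤ G + 1596 * fl ∨ G + 1596 * fl + 1596 ≤ tlo) ∧
      (tlo + 4 * nn ≤ (u.reg .rsp).toNat - 192 ∨ (u.reg .rsp).toNat + 8 ≤ tlo) ∧
      (nn = 0 ∨ (tlo = (u.reg .r8).toNat ∧ 0x119d40 ≤ tlo)) := by
    by_cases h0 : nn = 0
    · rw [if_pos h0] at htlo
      omega
    · rw [if_neg h0] at htlo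
      obtain ⟨hl, hd⟩ := htgt.resolve_left (by omega)
      have hw := hl.where_ hsh.inv hsh.offText (by omega)
      simp only [Block.disjoint, floorBlock, hG, voff] at hd
      simp only [Block.contains, floorBlock, hG, voff] at hgin
      omega
  obtain ⟨ht1, ht2, ht3, ht4⟩ := htw
  intro s j w_rip w_rsp w_r13 hjN hNpos w_kept hsame hun hs0 hs1 hs2 hs3 hs4 hs5 hs6 hst hsn w_eq hdf hmx hsse
  -- `n2 > 0` here: the precondition's second arm holds, and our window is the target block itself
  obtain ⟨hl, -⟩ := htgt.resolve_left (by omega)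
  have hNnn : N = (nn : Int) := by omega
  have htr : tlo = (u.reg .r8).toNat := by omega
  rw [htr] at hsame
  have hwt := hl.where_ hsh.inv hsh.offText (by omega)
  clear ht2 ht3 ht4 hwm' hwc' hwf' hwg' hwy'
  u_loop [j] (fun v => nn - (v.reg .r13).toNat)
  -- the counter as a 32-bit signed number, and the byte `ly & 255` (FIX 11)
  have hj31 : j < 2 ^ 31 := by omega
  have hsxj := sext_part_ofNat j hj31
  have hjint := toInt_part_ofNat j hj31
  obtain ⟨b, hb⟩ : ∃ b : Nat, s.mem.readLE (u.reg .rsp - 72) 1 = b := ⟨_, rfl⟩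
  have hb256 : b < 256 := by
    rw [← hb]
    exact Mem.readLE_lt _ _ _
  have hzb := zext8 b hb256
  u_walk hcode [hμ.vendor, hsxj, hzb] until [Vorbis.L.do_floor.loop2] span [Vorbis.L.textLo, Vorbis.L.textHi] side (v_side)
  · -- 0x108b7c: load4 target[j], 0 ≤ j < n2
    have hun' : ShadowUntouched u.mem s_108b7c.mem := by v_untouched
    rw [hjint, hn2N, hNnn] at hbr_108bb2
    exact hl.accSmall hsh.inv hun' _ 4 (by decide) (by u_omega) (by u_omega)
  · -- 0x108b90: load4 inverse_db_table[ly & 255] (SH5)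
    have hun' : ShadowUntouched u.mem s_108b90.mem := by v_untouched
    refine Vorbis.check_small_other hsh.inv hun' hdb (by decide) ?_ ?_
    · show 0x120680 ≤ _
      u_omega
    · show _ ≤ 0x120680 + 1024
      u_omega
  · -- the back edge 0x108ba7
    rw [hjint, hn2N, hNnn] at hbr_108bb2
    u_loop_back [j + 1]
    · rw [w_r13]
      exact inc_part_ofNat j hj31
    · omega
    · v_untouched
    · rw [w_flags]
      simp only [X86.User.df_setStatus]
      assumption
    · rw [w_mxcsr]
      exact hmx_108b99
    · refine ⟨?_⟩
      rw [w_mxcsr]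
      exact hmx_108b99
    · rw [w_r13, inc_part_ofNat j hj31, toNat_ofNat_small j (by omega), toNat_ofNat_small (j + 1) (by omega)]
      omega
  · -- the exit: `mov eax, 1 ; jmp 0x108b5e`, the epilogue, `ret`
    refine ReachVia.done (Or.inl ?_)
    v_returned
    refine ⟨w_rax, ?_⟩
    v_untouched

/-- **THE FLOOR LOOP** 0x108abd (line 3110 `for (q = 1; q < g->values; ++q)`) with the call of draw_line, its three back edges
and its two exits: into the tail loop (`tail_ok`), or `return TRUE`. Same binders as `tail_ok`; then the invariant of the loop
head at the state `s`: `q`, `lx`, `ly` (spilled at `[rsp]`, bounded so that draw_line's `idiv` cannot overflow). -/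
theorem loop_ok
    (Lay : Layout) (hLay : Lay.hi = 0x1000000) (μ : Microarch) (hμ : UserX.MicroOK μ) (u₀ : State)
    (hcode : HasCodeNat Lay u₀ Vorbis.L.do_floor.entry Vorbis.Code.code_do_floor.nat Vorbis.L.do_floor.size)
    (hload8 : Asan.SmallCheck Lay μ Vorbis.WayInv (Vorbis.CodeOK u₀) [.rax, .rcx, .rdx] 8 Vorbis.L.__asan_load8_noabort.entry)
    (hload1 : Asan.SmallCheck Lay μ Vorbis.WayInv (Vorbis.CodeOK u₀) [.rax, .rdx] 1 Vorbis.L.__asan_load1_noabort.entry)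
    (hload2 : Asan.SmallCheck Lay μ Vorbis.WayInv (Vorbis.CodeOK u₀) [.rax, .rcx, .rdx] 2 Vorbis.L.__asan_load2_noabort.entry)
    (hdraw : ∀ (others : List Obj) (frames : List (Nat × FrameLayout)),
      Calls Lay μ Vorbis.WayInv (Vorbis.conv u₀) Vorbis.L.draw_line.entry (Vorbis.Spec.draw_line.spec others frames))
    (hload4 : Asan.SmallCheck Lay μ Vorbis.WayInv (Vorbis.CodeOK u₀) [.rax, .rcx, .rdx] 4 Vorbis.L.__asan_load4_noabort.entry)
    (others : List Obj) (frames : List (Nat × FrameLayout)) (Blk : Block → Prop) (mi : Nat) (u : State) (ret : Word)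
    (he : AtEntry (Vorbis.conv u₀) Vorbis.L.do_floor.entry (Vorbis.Spec.do_floor.spec others frames Blk mi).frame ret u)
    (hpre : (Vorbis.Spec.do_floor.spec others frames Blk mi).pre u)
    (f m i C mux fl G V : Nat) (hf : (u.reg .rdi).toNat = f) (hm : (u.reg .rsi).toNat = m)
    (hi : s32 (u.reg .rdx) = (i : Int)) (hC : Mapping.chan u.mem m = C)
    (hmux : MappingChannel.mux u.mem (Mapping.chan_at u.mem m i) = mux)
    (hfl' : Mapping.submap_floor u.mem m mux = fl) (hG : stb_vorbis.floor_config u.mem f = G)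
    (hV : Floor1.values u.mem (G + 1596 * fl) = (V : Int))
    (n2v : BitVec 32) (N : Int) (nn tlo : Nat) (hn2v : (Word.part .w32 (u.reg .rcx)).sshiftRight 1 = n2v)
    (hN : s32 (u.reg .rcx) / 2 = N) (hnn : N.toNat = nn)
    (htlo : tlo = if nn = 0 then 0 else (u.reg .r8).toNat) :
    ∀ (s : State) (q lx : Nat) (lyv : BitVec 32), s.rip = Vorbis.L.do_floor.loop1 →
      s.reg .rsp = u.reg .rsp - 72 →
      s.reg .rbx = UInt64.ofNat fl * 1596 + UInt64.ofNat G →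
      s.reg .r15 = u.reg .r9 →
      s.reg .r12 = UInt64.ofNat q → 1 ≤ q → q ≤ V →
      s.reg .r13 = UInt64.ofNat lx → lx < 65536 →
      RegsKept [.r13, .rdi, .rcx, .r15, .r12, .rbx, .rbp, .rsp, .rax, .rdx, .r14, .rsi, .r8, .r9, .r10, .r11, .r16, .r17, .r18, .r19, .r20, .r21, .r22, .r23, .r24, .r25, .r26, .r27, .r28, .r29, .r30, .r31] u s →
      Mem.SameExcept [⟨(u.reg .rsp).toNat - 192, (u.reg .rsp).toNat⟩, ⟨tlo, tlo + 4 * nn⟩] u.mem s.mem →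
      ShadowUntouched u.mem s.mem →
      UInt64.ofNat (s.mem.readLE (u.reg .rsp) 8) = ret →
      UInt64.ofNat (s.mem.readLE (u.reg .rsp - 8) 8) = u.reg .r15 →
      UInt64.ofNat (s.mem.readLE (u.reg .rsp - 16) 8) = u.reg .r14 →
      UInt64.ofNat (s.mem.readLE (u.reg .rsp - 24) 8) = u.reg .r13 →
      UInt64.ofNat (s.mem.readLE (u.reg .rsp - 32) 8) = u.reg .r12 →
      UInt64.ofNat (s.mem.readLE (u.reg .rsp - 40) 8) = u.reg .rbp →
      UInt64.ofNat (s.mem.readLE (u.reg .rsp - 48) 8) = u.reg .rbx →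
      UInt64.ofNat (s.mem.readLE (u.reg .rsp - 64) 8) = u.reg .r8 →
      s.mem.readLE (u.reg .rsp - 68) 4 = n2v.toNat →
      s.mem.readLE (u.reg .rsp - 72) 4 = lyv.toNat → -8355840 ≤ lyv.toInt → lyv.toInt ≤ 8355585 →
      Mem.EqOn Vorbis.L.textLo Vorbis.L.textHi u₀.mem s.mem →
      s.flags .df = false → s.mxcsr &&& 8064 = 8064 → SseOK s →
      ReachVia Lay μ WayInv s (Returned (conv u₀) (do_floor.spec others frames Blk mi) u ret) := by
  have htail := tail_ok Lay hLay μ hμ u₀ hcode hload8 hload1 hload2 hdraw hload4 others frames Blk mi u ret he hpre f m i C mux fl G V hf hm hi hC hmux hfl' hG hV n2v N nn tlo hn2v hN hnn htlo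
  v_entry he
  obtain ⟨hsh, hok, hlive, hob, hfl, hmp, hmi, hrsi, ⟨hi0, hi1⟩, ⟨sz, hfy, hfysz⟩, htgt, hdb⟩ := hpre
  have hdraw' := hdraw others frames
  have hsp := hsh.rsp
  -- THE OBJECTS: `*f`, the mapping record, the `chan` element, the floor element, the `finalY` block
  rw [hf] at hob hfl hmp hmi hrsi hi1 hfysz htgt
  rw [hm] at hrsi
  have hrec : MappingAtOK Blk u.mem f m := by
    rw [hrsi]
    exact hmp.record mi hmi
  have hiC : (i : Int) < stb_vorbis.channels u.mem f := by omega
  obtain ⟨hmuxS, hmux16⟩ := hrec.mux_lt hiC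
  have hflc := hrec.floor_of_mux_lt hiC
  rw [hmux] at hmuxS hmux16 hflc
  rw [hfl'] at hflc
  have hFL1 := hfl.FL1
  have hfl64 : fl < 64 := by omega
  have hg : IsFloor u.mem f (G + 1596 * fl) := IsFloor.of_eq hflc (by rw [hG]; rfl)
  have hF1 := hfl.floor hg
  obtain ⟨hV2', hV250'⟩ := hF1.values_bounds
  have hV2 : 2 ≤ V := by omega
  have hV250 : V ≤ 250 := by omega
  have hszV : 2 * V ≤ sz := by
    have := hfysz _ hg
    omega
  -- where they are: in the data space, off this function's stack
  have hmc := hmp.MP1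
  obtain ⟨hwm, hwm'⟩ := range_where hsh hlive he_room he_top hmp.MP1_block m 56 (by omega)
    (by rw [hrsi]; simp only [stb_vorbis.mapping_at, voff]; omega)
    (by rw [hrsi]; simp only [stb_vorbis.mapping_at, voff]; omega)
  obtain ⟨hwc, hwc'⟩ := range_where hsh hlive he_room he_top hrec.MP2 (C + 3 * i) 3 (by omega)
    (by rw [hC]; simp only []; omega) (by rw [hC, nchan_def]; simp only [voff]; omega)
  obtain ⟨hwf, hwf'⟩ := range_where hsh hlive he_room he_top hob f 1808 (by omega)
    (by simp only [vblock]; omega) (by simp only [vblock, voff]; omega)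
  have hgin := hfl.toFloorShape.elem_in hg (off := 0) (n := 1596) (by simp only [voff]; omega)
  obtain ⟨hwg, hwg'⟩ := range_where hsh hlive he_room he_top hfl.FL2 (G + 1596 * fl) 1596 (by omega)
    (by simp only [Block.contains] at hgin; omega) (by simp only [Block.contains] at hgin; omega)
  obtain ⟨hwy, hwy'⟩ := range_where hsh hlive he_room he_top hfy (u.reg .r9).toNat (2 * V) (by omega)
    (by simp only []; omega) (by simp only []; omega)
  -- THE LOADS OF THE PROLOGUE, in the walker's form (facts `u.mem.readLE a n = x` are rewrite rules of every step)
  have hsx : Word.ofBV (BitVec.signExtend 64 (Word.part .w32 (u.reg .rdx))) = UInt64.ofNat i := sext_of_nonneg _ i hi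
  have hi22 : i < 0x400000 := by omega
  have hz1 := zext8 mux (by omega)
  have hz2 := zext8 fl (by omega)
  have hz3 := zext_part8 fl (by omega)
  have r1 : u.mem.readLE (u.reg .rsi + 8) 8 = C := by
    rw [← hC, readLE_at u.mem _ (m + 8) 8 (by u_omega)]
    simp only [vacc, voff]
    rfl
  have r2 : u.mem.readLE (UInt64.ofNat i + UInt64.ofNat i * 2 + UInt64.ofNat C + 2) 1 = mux := by
    rw [← hmux, readLE_at u.mem _ (C + 3 * i + 2) 1 (by u_omega)]
    simp only [Mapping.chan_at, MappingChannel.mux, voff, hC]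
    rfl
  have r3 : u.mem.readLE (u.reg .rsi + UInt64.ofNat mux + 17) 1 = fl := by
    rw [← hfl', readLE_at u.mem _ (m + 17 + mux) 1 (by u_omega)]
    simp only [vacc, voff]
    rfl
  have r4 : u.mem.readLE (u.reg .rdi + (UInt64.ofNat fl + 88) * 2 + 4) 2 = 1 := by
    rw [← hfl.FL3 fl hflc, readLE_at u.mem _ (f + 180 + 2 * fl) 2 (by u_omega)]
    simp only [vacc, voff]
    rfl
  have r5 : u.mem.readLE (u.reg .rdi + 312) 8 = G := by
    rw [← hG, readLE_at u.mem _ (f + 312) 8 (by u_omega)]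
    simp only [vacc, voff]
    rfl
  have rvu : u.mem.readLE (UInt64.ofNat fl * 1596 + UInt64.ofNat G + 1592) 4 = V := by
    rw [readLE_at u.mem _ (G + 1596 * fl + 1592) 4 (by u_omega)]
    have h32 := u.mem.i32_cases (G + 1596 * fl + 1592)
    have hV' : u.mem.i32 (G + 1596 * fl + 1592) = (V : Int) := by
      rw [← hV]
      simp only [vacc, voff]
    show u.mem.u32 (G + 1596 * fl + 1592) = V
    omega
  have hso : ∀ q : Nat, q < V →
      u.mem.readLE (UInt64.ofNat fl * 1596 + UInt64.ofNat G + UInt64.ofNat q + 838) 1 < V := by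
    intro q hq
    have h9 := hF1.sorted_lt (q := q) (by omega)
    rw [hV] at h9
    rw [readLE_at u.mem _ (G + 1596 * fl + 838 + q) 1 (by u_omega)]
    simp only [vacc, voff] at h9
    have e : u.mem.readLE (addr (G + 1596 * fl + 838 + q)) 1 = u.mem.u8 (G + 1596 * fl + 838 + q) := rfl
    rw [e]
    omega
  -- `n2 = n >> 1`, and THE WINDOW OF THE TARGET THAT IS WRITTEN (empty, placed at 0, when `n2 ≤ 0`)
  have hn2N : n2v.toInt = N := by
    rw [← hn2v, toInt_sar1]
    exact hN
  have hNlt : N < 2 ^ 31 := by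
    rw [← hn2N]
    exact BitVec.toInt_lt
  rw [hN] at htgt
  rw [hnn] at htgt
  have htw : tlo + 4 * nn ≤ 0xC00000 ∧
      (tlo + 4 * nn ≤ G + 1596 * fl ∨ G + 1596 * fl + 1596 ≤ tlo) ∧
      (tlo + 4 * nn ≤ (u.reg .rsp).toNat - 192 ∨ (u.reg .rsp).toNat + 8 ≤ tlo) ∧
      (nn = 0 ∨ (tlo = (u.reg .r8).toNat ∧ 0x119d40 ≤ tlo)) := by
    by_cases h0 : nn = 0
    · rw [if_pos h0] at htlo
      omega
    · rw [if_neg h0] at htlo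
      obtain ⟨hl, hd⟩ := htgt.resolve_left (by omega)
      have hw := hl.where_ hsh.inv hsh.offText (by omega)
      simp only [Block.disjoint, floorBlock, hG, voff] at hd
      simp only [Block.contains, floorBlock, hG, voff] at hgin
      omega
  obtain ⟨ht1, ht2, ht3, ht4⟩ := htw
  have hVint := toInt_ofNat32_small V (by omega)
  intro s q lx lyv w_rip w_rsp w_rbx w_r15 w_r12 hq1 hqV w_r13 hlx w_kept hsame hun hs0 hs1 hs2 hs3 hs4 hs5 hs6 hst hsn hsly hly0 hly1 w_eq hdf hmx hsse
  clear hwm' hwc' hwf'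
  u_loop [q, lx, lyv] (fun v => V - (v.reg .r12).toNat)
  -- the counters as 32-bit numbers
  have hq31 : q < 2 ^ 31 := by omega
  have hsxq := sext_part_ofNat q hq31
  have hqint := toInt_part_ofNat q hq31
  have hlxint := toInt_part_ofNat lx (by omega)
  -- the loads of this round from the floor element (unchanged: the element is off the stack and off the target window)
  have rv : s.mem.readLE (UInt64.ofNat fl * 1596 + UInt64.ofNat G + 1592) 4 = V := by
    u_frame rvu
  obtain ⟨jv, hjv⟩ : ∃ jv : Nat,
      s.mem.readLE (UInt64.ofNat fl * 1596 + UInt64.ofNat G + UInt64.ofNat q + 838) 1 = jv := ⟨_, rfl⟩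
  have hjv256 : jv < 256 := by
    rw [← hjv]
    exact Mem.readLE_lt _ _ _
  have hjvV : q < V → jv < V := by
    intro hq
    have h1 := hso q hq
    have h2 : s.mem.readLE (UInt64.ofNat fl * 1596 + UInt64.ofNat G + UInt64.ofNat q + 838) 1 =
        u.mem.readLE (UInt64.ofNat fl * 1596 + UInt64.ofNat G + UInt64.ofNat q + 838) 1 := by
      u_frame (rfl : u.mem.readLE (UInt64.ofNat fl * 1596 + UInt64.ofNat G + UInt64.ofNat q + 838) 1 = _)
    rw [← hjv, h2]
    exact h1
  have hzj := zext8 jv hjv256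
  have hzj' := zext_part8 jv hjv256
  have hsxj := sext_part_ofNat jv (by omega)
  obtain ⟨yv, hyv⟩ : ∃ yv : Nat, s.mem.readLE (u.reg .r9 + UInt64.ofNat jv * 2) 2 = yv := ⟨_, rfl⟩
  obtain ⟨mult, hmult⟩ : ∃ mult : Nat,
      s.mem.readLE (UInt64.ofNat fl * 1596 + UInt64.ofNat G + 1588) 1 = mult := ⟨_, rfl⟩
  obtain ⟨hx, hhx⟩ : ∃ hx : Nat,
      s.mem.readLE (UInt64.ofNat fl * 1596 + UInt64.ofNat G + (UInt64.ofNat jv + 168) * 2 + 2) 2 = hx := ⟨_, rfl⟩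
  have hhx16 : hx < 65536 := by
    rw [← hhx]
    exact Mem.readLE_lt _ _ _
  have hzx := zext16 hx hhx16
  have hhxint := toInt_part_ofNat hx (by omega)
  -- hy = finalY[j] * g->floor1_multiplier, bounded
  obtain ⟨hyv, hhyv⟩ : ∃ hyv : BitVec 32,
      BitVec.signExtend 32 (BitVec.setWidth 16 (BitVec.zeroExtend 32 (BitVec.ofNat 16 yv))) *
        BitVec.zeroExtend 32 (BitVec.ofNat 8 mult) = hyv := ⟨_, rfl⟩
  obtain ⟨hhy0, hhy1⟩ := mul_i16_u8 (BitVec.setWidth 16 (BitVec.zeroExtend 32 (BitVec.ofNat 16 yv))) (BitVec.ofNat 8 mult)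
  rw [hhyv] at hhy0 hhy1
  u_walk hcode [hμ.vendor, hsxq, hzj, hzj', hsxj, hzx, hhyv] until [Vorbis.L.do_floor.loop1, Vorbis.L.do_floor.loop2] span [Vorbis.L.textLo, Vorbis.L.textHi] side (v_side)
  · -- 0x108ac4: load4 g->values
    have hun' : ShadowUntouched u.mem s_108ac4.mem := by v_untouched
    exact check_site hsh.inv hun' (hfl.toFloorShape.site_elem hlive hg 1592 4 (by simp only [voff]; omega) (by omega) rfl)
      (by u_omega)
  · -- 0x108add: load1 g->sorted_order[q], q < values ≤ 250
    have hun' : ShadowUntouched u.mem s_108add.mem := by v_untouched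
    rw [hVint, hqint] at hbr_108ad0
    exact check_site hsh.inv hun' (hfl.toFloorShape.site_elem hlive hg (838 + q) 1 (by simp only [voff]; omega) (by omega) rfl)
      (by u_omega)
  · -- 0x108af8: load2 finalY[j], j = sorted_order[q] < values (FL9)
    have hun' : ShadowUntouched u.mem s_108af8.mem := by v_untouched
    rw [hVint, hqint] at hbr_108ad0
    have hjV := hjvV (by omega)
    exact check_site hsh.inv hun' (Site.of_blk hlive hfy (a := (u.reg .r9).toNat + 2 * jv) (n := 2) (by simp only []; omega)
      (by simp only []; omega) (by omega)) (by u_omega)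
  · -- 0x108b10: load1 g->floor1_multiplier
    have hun' : ShadowUntouched u.mem s_108b10.mem := by v_untouched
    exact check_site hsh.inv hun' (hfl.toFloorShape.site_elem hlive hg 1588 1 (by simp only [voff]; omega) (by omega) rfl)
      (by u_omega)
  · -- 0x108b31: load2 g->Xlist[j], j a byte
    have hun' : ShadowUntouched u.mem s_108b31.mem := by v_untouched
    exact check_site hsh.inv hun' (hfl.toFloorShape.site_elem hlive hg (338 + 2 * jv) 2 (by simp only [voff]; omega) (by omega) rfl)
      (by u_omega)
  · -- the call of draw_line: DF and MXCSR
    v_inv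
  · -- draw_line's precondition
    have e_rsi : s32 (s_108aae.reg .rsi) = (lx : Int) := by
      rw [w_rsi]
      exact s32_ofBV_part_ofNat lx (by omega)
    have e_rcx : s32 (s_108aae.reg .rcx) = (hx : Int) := by
      rw [w_rcx]
      exact s32_ofBV_part_ofNat hx (by omega)
    have e_rdx : s32 (s_108aae.reg .rdx) = lyv.toInt := by
      rw [w_rdx]
      exact s32_ofBV_ofNat_toNat lyv
    have e_r8 : s32 (s_108aae.reg .r8) = hyv.toInt := by
      rw [w_r8]
      exact s32_ofBV hyv
    have e_r9 : s32 (s_108aae.reg .r9) = N := by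
      rw [w_r9, s32_ofBV_ofNat_toNat]
      exact hn2N
    rw [part32_ofNat lx (by omega), part32_ofNat hx (by omega)] at hbr_108b3f
    refine ⟨?_, hdb, ?_, ?_, ?_, ?_⟩
    · refine hsh.callee ?_ ?_ ?_ ?_
      · v_untouched
      · rw [w_rsp]
        u_omega
      · rw [w_rsp]
        u_omega
      · rw [w_rsp]
        u_omega
    · rw [e_rcx, e_rsi]
      omega
    · rw [e_rcx, e_rsi]
      omega
    · rw [e_r8, e_rdx]
      omega
    · rw [e_rsi, e_rcx, e_r9, w_rdi]
      intro hlt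
      have hmin := Int.min_le_right (hx : Int) N
      refine ⟨by omega, ?_⟩
      rw [hnn]
      exact (htgt.resolve_left (by omega)).1
  · -- the exit of the floor loop with `lx < n2`: the tail loop
    rw [hlxint, hn2N] at hbr_108b57
    refine ReachVia.mono (htail s_108b57 lx w_rip w_rsp w_r13 (by omega) (by omega) (w_kept.mono_all (by rfl)) ?_ ?_ ?_ ?_ ?_ ?_ ?_ ?_ ?_ ?_ ?_ w_eq ?_ ?_ ?_)
      (fun v hv => Or.inl hv)
    · u_same
    · v_untouched
    · u_frame hs0
    · u_frame hs1
    · u_frame hs2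
    · u_frame hs3
    · u_frame hs4
    · u_frame hs5
    · u_frame hs6
    · u_frame hst
    · u_frame hsn
    · rw [w_flags]
      simp only [X86.User.df_setStatus]
      assumption
    · rw [w_mxcsr]
      exact hmx
    · refine ⟨?_⟩
      rw [w_mxcsr]
      exact hmx
  · -- the exit with `lx ≥ n2`: `return TRUE`
    refine ReachVia.done (Or.inl ?_)
    v_returned
    refine ⟨w_rax, ?_⟩
    v_untouched
  · -- the back edge from `finalY[j] < 0` (0x108b04): nothing changed but `q`
    rw [hVint, hqint] at hbr_108ad0
    u_loop_back [q + 1, lx, lyv]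
    · rw [w_r12]
      exact inc_part_ofNat q hq31
    · omega
    · omega
    · v_untouched
    · rw [w_flags]
      simp only [X86.User.df_setStatus]
      assumption
    · rw [w_mxcsr]
      exact hmx
    · refine ⟨?_⟩
      rw [w_mxcsr]
      exact hmx
    · rw [w_r12, inc_part_ofNat q hq31, toNat_ofNat_small q (by omega), toNat_ofNat_small (q + 1) (by omega)]
      omega
  · -- after draw_line (0x108ab3): `lx = hx, ly = hy`, `++q`
    rw [hVint, hqint] at hbr_108ad0
    v_after_call w_rsp_108aae w_mem_108aae
    -- draw_line's window `target[lx .. min(hx, n2))` is empty or inside ours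
    have e_rsi : s32 (s_108aae.reg .rsi) = (lx : Int) := by
      rw [w_rsi_108aae]
      exact s32_ofBV_part_ofNat lx (by omega)
    have e_rcx : s32 (s_108aae.reg .rcx) = (hx : Int) := by
      rw [w_rcx_108aae]
      exact s32_ofBV_part_ofNat hx (by omega)
    have e_r9 : s32 (s_108aae.reg .r9) = N := by
      rw [w_r9_108aae, s32_ofBV_ofNat_toNat]
      exact hn2N
    rw [w_rdi_108aae, e_rsi, e_rcx, e_r9] at w_same
    have hminr := Int.min_le_right (hx : Int) N
    replace w_same := sameExcept_widen (lo := tlo) (hi := tlo + 4 * nn) w_same (by omega)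
    -- what the loop carries, over the call
    have hs0' : UInt64.ofNat (s_108aaer.mem.readLE (u.reg .rsp) 8) = ret := by
      u_frame hs0
    have hs1' : UInt64.ofNat (s_108aaer.mem.readLE (u.reg .rsp - 8) 8) = u.reg .r15 := by
      u_frame hs1
    have hs2' : UInt64.ofNat (s_108aaer.mem.readLE (u.reg .rsp - 16) 8) = u.reg .r14 := by
      u_frame hs2
    have hs3' : UInt64.ofNat (s_108aaer.mem.readLE (u.reg .rsp - 24) 8) = u.reg .r13 := by
      u_frame hs3
    have hs4' : UInt64.ofNat (s_108aaer.mem.readLE (u.reg .rsp - 32) 8) = u.reg .r12 := by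
      u_frame hs4
    have hs5' : UInt64.ofNat (s_108aaer.mem.readLE (u.reg .rsp - 40) 8) = u.reg .rbp := by
      u_frame hs5
    have hs6' : UInt64.ofNat (s_108aaer.mem.readLE (u.reg .rsp - 48) 8) = u.reg .rbx := by
      u_frame hs6
    have hst' : UInt64.ofNat (s_108aaer.mem.readLE (u.reg .rsp - 64) 8) = u.reg .r8 := by
      u_frame hst
    have hsn' : s_108aaer.mem.readLE (u.reg .rsp - 68) 4 = n2v.toNat := by
      u_frame hsn
    have hun' : ShadowUntouched u.mem s_108aaer.mem := by
      v_untouched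
    have hsame' : Mem.SameExcept [⟨(u.reg .rsp).toNat - 192, (u.reg .rsp).toNat⟩, ⟨tlo, tlo + 4 * nn⟩]
        u.mem s_108aaer.mem := by
      u_same
    u_walk hcode [hμ.vendor, hzx] until [Vorbis.L.do_floor.loop1] span [Vorbis.L.textLo, Vorbis.L.textHi] side (v_side)
    -- the back edge 0x108ab9
    have hr12 : s_108ab9.reg .r12 = UInt64.ofNat (q + 1) := by
      rw [w_r12]
      exact inc_part_ofNat q hq31
    have hq1' : 1 ≤ q + 1 := by omega
    have hqV' : q + 1 ≤ V := by omega
    have hr13 : s_108ab9.reg .r13 = UInt64.ofNat hx := by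
      rw [w_r13]
      exact ofBV_part_ofNat hx (by omega)
    have hunF : ShadowUntouched u.mem s_108ab9.mem := by
      v_untouched
    have hlyF : s_108ab9.mem.readLE (u.reg .rsp - 72) 4 = hyv.toNat := by
      rw [w_mem, Mem.readLE_writeLE_same _ _ _ _ (by decide)]
      have := hyv.isLt
      omega
    have hdfF : s_108ab9.flags .df = false := by
      rw [w_flags]
      simp only [X86.User.df_setStatus]
      assumption
    have hmxF : s_108ab9.mxcsr &&& 8064 = 8064 := by
      rw [w_mxcsr]
      exact w_mx
    have hsseF : SseOK s_108ab9 := ⟨hmxF⟩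
    u_loop_back [q + 1, hx, hyv]
    rw [hr12, toNat_ofNat_small q (by omega), toNat_ofNat_small (q + 1) (by omega)]
    omega
  · -- the back edge from `lx == hx` (0x108b4b): `lx = hx, ly = hy`, `++q`
    rw [hVint, hqint] at hbr_108ad0
    u_loop_back [q + 1, hx, hyv]
    · rw [w_r12]
      exact inc_part_ofNat q hq31
    · omega
    · omega
    · rw [w_r13]
      exact ofBV_part_ofNat hx (by omega)
    · v_untouched
    · rw [w_mem, Mem.readLE_writeLE_same _ _ _ _ (by decide)]
      have := hyv.isLt
      omega
    · rw [w_flags]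
      simp only [X86.User.df_setStatus]
      assumption
    · rw [w_mxcsr]
      exact hmx
    · refine ⟨?_⟩
      rw [w_mxcsr]
      exact hmx
    · rw [w_r12, inc_part_ofNat q hq31, toNat_ofNat_small q (by omega), toNat_ofNat_small (q + 1) (by omega)]
      omega

end Vorbis.Spec.do_floor
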